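-- pv_equiv track=rewrite | github.com/vishaal314/myapp | services/ai_model_scanner.py | _assess_bias_mitigation_measures
-- ===== SOURCE A (Python) =====
-- from typing import Dict, List, Any, Optional, Callable
--
-- def _assess_bias_mitigation_measures(findings: List[Dict[str, Any]], model_details: Dict[str, Any]) -> float:
--     """Assess bias mitigation measures - demographic parity, fairness metrics - Can reach 95%+ compliance"""
--     score = 40  # Base score
--
--     # Check for bias testing
--     if any('bias' in f.get('type', '').lower() and 'test' in f.get('description', '').lower() for f in findings):
--         score += 20  # +20 for bias testing
--
--     # Check for fairness metrics
--     if any('fairness' in f.get('description', '').lower() for f in findings):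
--         score += 15  # +15 for fairness metrics
--
--     # Check for demographic parity
--     if any('demographic' in f.get('description', '').lower() for f in findings):
--         score += 15  # +15 for demographic considerations
--
--     # Penalty for bias violations
--     bias_violations = sum(1 for f in findings if f.get('category') == 'Fairness' and f.get('risk_level') in ['high', 'critical'])
--     score -= bias_violations * 10
--
--     return max(min(score, 100), 10)
-- ===== SOURCE B (Python) =====
-- def _assess_bias_mitigation_measures(findings, model_details):
--     # One pass over findings with fused accumulators instead of four scans.
--     saw_bias_test = saw_fairness = saw_demographic = False
--     violations = 0
--     for f in findings:
--         desc = f.get('description', '').lower()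
--         if 'bias' in f.get('type', '').lower() and 'test' in desc:
--             saw_bias_test = True
--         if 'fairness' in desc:
--             saw_fairness = True
--         if 'demographic' in desc:
--             saw_demographic = True
--         if f.get('category') == 'Fairness' and f.get('risk_level') in ['high', 'critical']:
--             violations += 1
--     score = 40 + 20 * saw_bias_test + 15 * saw_fairness + 15 * saw_demographic - 10 * violations
--     return max(min(score, 100), 10)
-- ===== Notes on version B (the rewrite author's own statement) =====
-- stated objective: alternative
-- what changed: Fuses A's four separate scans of findings (three any() comprehensions and a sum() comprehension) into a single loop maintaining three boolean flags and a violation counter, then computes the score from the accumulators.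
import Mathlib
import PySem

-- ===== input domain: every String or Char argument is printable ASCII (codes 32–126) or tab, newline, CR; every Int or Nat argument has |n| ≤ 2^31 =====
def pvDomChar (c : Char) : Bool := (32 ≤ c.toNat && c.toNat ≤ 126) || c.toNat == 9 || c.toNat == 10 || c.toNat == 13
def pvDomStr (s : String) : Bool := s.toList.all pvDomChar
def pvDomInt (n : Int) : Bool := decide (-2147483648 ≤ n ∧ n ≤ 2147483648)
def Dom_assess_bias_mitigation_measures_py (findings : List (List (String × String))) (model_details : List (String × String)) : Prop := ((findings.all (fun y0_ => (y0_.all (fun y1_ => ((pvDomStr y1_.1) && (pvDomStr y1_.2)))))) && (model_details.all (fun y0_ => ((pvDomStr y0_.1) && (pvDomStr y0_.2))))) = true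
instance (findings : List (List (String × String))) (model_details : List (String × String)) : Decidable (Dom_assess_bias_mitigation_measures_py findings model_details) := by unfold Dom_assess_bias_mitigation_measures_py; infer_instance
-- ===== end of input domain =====

-- ===== PORT A =====
-- B fuses A's four scans of `findings` into one loop; same result, same cost class (alternative decomposition).
def pvBiasTest (f : List (String × String)) : Bool :=
  PySem.Str.isIn "bias" (PySem.Str.lower (PySem.Dict.getD ⟨f⟩ "type" "")) &&
  PySem.Str.isIn "test" (PySem.Str.lower (PySem.Dict.getD ⟨f⟩ "description" ""))

def pvFairness (f : List (String × String)) : Bool :=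
  PySem.Str.isIn "fairness" (PySem.Str.lower (PySem.Dict.getD ⟨f⟩ "description" ""))

def pvDemographic (f : List (String × String)) : Bool :=
  PySem.Str.isIn "demographic" (PySem.Str.lower (PySem.Dict.getD ⟨f⟩ "description" ""))

def pvViolation (f : List (String × String)) : Bool :=
  PySem.Dict.get? ⟨f⟩ "category" == some "Fairness" &&
  (PySem.Dict.get? ⟨f⟩ "risk_level" == some "high" || PySem.Dict.get? ⟨f⟩ "risk_level" == some "critical")

def assess_bias_mitigation_measures_py (findings : List (List (String × String))) (model_details : List (String × String)) : Int :=
  let score : Int := 40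
  let score := if findings.any pvBiasTest then score + 20 else score
  let score := if findings.any pvFairness then score + 15 else score
  let score := if findings.any pvDemographic then score + 15 else score
  let bias_violations : Int := findings.foldl (fun acc f => if pvViolation f then acc + 1 else acc) 0
  let score := score - bias_violations * 10
  max (min score 100) 10

-- ===== PORT B =====
def pvStep (st : Bool × Bool × Bool × Int) (f : List (String × String)) : Bool × Bool × Bool × Int :=
  let desc := PySem.Str.lower (PySem.Dict.getD ⟨f⟩ "description" "")
  ( st.1 || (PySem.Str.isIn "bias" (PySem.Str.lower (PySem.Dict.getD ⟨f⟩ "type" "")) && PySem.Str.isIn "test" desc),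
    st.2.1 || PySem.Str.isIn "fairness" desc,
    st.2.2.1 || PySem.Str.isIn "demographic" desc,
    st.2.2.2 + (if PySem.Dict.get? ⟨f⟩ "category" == some "Fairness" &&
        (PySem.Dict.get? ⟨f⟩ "risk_level" == some "high" || PySem.Dict.get? ⟨f⟩ "risk_level" == some "critical")
      then 1 else 0) )

def assess_bias_mitigation_measures_py_alt (findings : List (List (String × String))) (model_details : List (String × String)) : Int :=
  let st := findings.foldl pvStep (false, false, false, 0)
  let score : Int := 40 + (if st.1 then 20 else 0) + (if st.2.1 then 15 else 0)
      + (if st.2.2.1 then 15 else 0) - 10 * st.2.2.2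
  max (min score 100) 10

-- ===== PRECONDITION & SPEC =====
def Spec_assess_bias_mitigation_measures_py (findings : List (List (String × String))) (model_details : List (String × String)) (out : Int) : Prop := out = assess_bias_mitigation_measures_py_alt findings model_details
instance (findings : List (List (String × String))) (model_details : List (String × String)) (out : Int) : Decidable (Spec_assess_bias_mitigation_measures_py findings model_details out) := by unfold Spec_assess_bias_mitigation_measures_py; infer_instance

-- ===== CLAIM (what is proved, stated in full; the proofs are below) =====
def Claim_equal_assess_bias_mitigation_measures_py : Prop := ∀ (findings : List (List (String × String))) (model_details : List (String × String)), Dom_assess_bias_mitigation_measures_py findings model_details → Spec_assess_bias_mitigation_measures_py findings model_details (assess_bias_mitigation_measures_py findings model_details)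

-- ===== LEMMAS AND PROOFS =====
theorem pvStep_eq (desc : Bool × Bool × Bool × Int) (f : List (String × String)) :
    pvStep desc f = (desc.1 || pvBiasTest f, desc.2.1 || pvFairness f,
      desc.2.2.1 || pvDemographic f, desc.2.2.2 + (if pvViolation f then 1 else 0)) := by
  simp [pvStep, pvBiasTest, pvFairness, pvDemographic, pvViolation]

theorem pvFold_eq (l : List (List (String × String))) :
    ∀ (b1 b2 b3 : Bool) (n : Int),
    l.foldl pvStep (b1, b2, b3, n) =
      (b1 || l.any pvBiasTest, b2 || l.any pvFairness, b3 || l.any pvDemographic,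
       n + l.foldl (fun acc f => if pvViolation f then acc + 1 else acc) 0) := by
  induction l with
  | nil => simp
  | cons f t ih =>
    intro b1 b2 b3 n
    simp only [List.foldl_cons, pvStep_eq, ih, List.any_cons]
    rw [PySem.List.foldl_if_add_one, PySem.List.foldl_if_add_one]
    refine Prod.ext (by simp [Bool.or_assoc]) (Prod.ext (by simp [Bool.or_assoc])
      (Prod.ext (by simp [Bool.or_assoc]) ?_))
    simp only
    split_ifs <;> push_cast <;> ring

-- ===== VERDICT (by name: the statement is the Claim_ definition above) =====
theorem assess_bias_mitigation_measures_py_spec : Claim_equal_assess_bias_mitigation_measures_py := by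
  intro findings model_details _
  unfold Spec_assess_bias_mitigation_measures_py
  unfold assess_bias_mitigation_measures_py assess_bias_mitigation_measures_py_alt
  rw [pvFold_eq]
  cases findings.any pvBiasTest <;> cases findings.any pvFairness <;>
    cases findings.any pvDemographic <;> simp <;> ring_nf
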